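-- pv_equiv track=rewrite | github.com/mdoumbouya/codeocr | src/code_ocr/indentation_recognition.py | add_gaussian_prediction_labels
-- ===== SOURCE A (Python) =====
-- import copy
--
-- def add_gaussian_prediction_labels(lines, gaussian_prediction):
--     """
--     This function adds Gaussian prediction labels to the data points.
--
--     Parameters:
--     lines (list): A list of dictionaries where each dictionary represents a data point.
--                         Each data point must have a 'delta_type' key.
--     gaussian_prediction (list): A list of gaussian predictions. The length of this list should be equal to
--                             the number of 'positive' delta_type in lines.
--
--     Returns:
--     list: Returns a list of modified data points with added 'gaussian_prediction' key. If 'delta_type'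
--             is 'positive', 'gaussian_prediction' key will have the corresponding value from gaussian_prediction
--             list. If 'delta_type' is not 'positive', 'gaussian_prediction' key will have None as value.
--     """
--     modified_lines = copy.deepcopy(lines)
--     i = 0
--     for point in modified_lines:
--         if point['delta_type'] == 'positive':
--             point['gaussian_prediction'] = str(gaussian_prediction[i])
--             i += 1
--         else:
--             point['gaussian_prediction'] = None
--
--     return modified_lines
-- ===== SOURCE B (Python) =====
-- import copy
--
-- def add_gaussian_prediction_labels(lines, gaussian_prediction):
--     modified_lines = copy.deepcopy(lines)
--     for point in modified_lines:
--         point['gaussian_prediction'] = None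
--     positive_positions = [pos for pos, point in enumerate(modified_lines)
--                           if point['delta_type'] == 'positive']
--     for count, pos in enumerate(positive_positions):
--         modified_lines[pos]['gaussian_prediction'] = str(gaussian_prediction[count])
--     return modified_lines
-- ===== Notes on version B (the rewrite author's own statement) =====
-- stated objective: alternative
-- what changed: A threads a counter through one pass that labels each point as it goes; B first labels every point None in one pass, builds an index table of the positions of 'positive' points, then fills those positions from the prediction list in a second enumerated pass.
import Mathlib
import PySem

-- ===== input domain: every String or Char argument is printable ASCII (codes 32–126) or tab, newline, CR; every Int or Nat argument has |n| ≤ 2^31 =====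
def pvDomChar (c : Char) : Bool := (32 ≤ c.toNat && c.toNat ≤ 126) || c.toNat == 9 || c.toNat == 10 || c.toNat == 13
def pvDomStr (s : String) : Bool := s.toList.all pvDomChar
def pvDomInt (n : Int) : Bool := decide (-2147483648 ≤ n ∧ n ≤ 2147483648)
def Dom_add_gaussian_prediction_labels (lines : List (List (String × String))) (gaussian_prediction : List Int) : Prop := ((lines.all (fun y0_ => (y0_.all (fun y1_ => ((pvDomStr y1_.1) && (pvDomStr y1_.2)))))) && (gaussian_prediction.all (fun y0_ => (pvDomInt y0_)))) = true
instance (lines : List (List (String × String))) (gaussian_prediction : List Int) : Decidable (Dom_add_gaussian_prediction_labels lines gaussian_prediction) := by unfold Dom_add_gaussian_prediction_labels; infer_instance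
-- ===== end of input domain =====

-- B replaces A's single counter-threaded pass by two passes: a first pass setting every
-- point's label to None plus an index table of the 'positive' positions, then a fill pass
-- over that table (objective: alternative decomposition; same cost).

-- shared type shim: the Python dict of a data point, values lifted to Option String
def pvPointDict (p : List (String × String)) : PySem.Dict String (Option String) :=
  PySem.Dict.ofList (p.map (fun kv => (kv.1, some kv.2)))

-- ===== PORT A =====
def agplLoopA (gp : List Int) : List (List (String × String)) → Nat → List (List (String × Option String))
  | [], _ => []
  | p :: rest, i =>
    let d := pvPointDict p
    if d.get? "delta_type" == some (some "positive") then
      ((d.insert "gaussian_prediction" (some (PySem.Int.toStr (gp.getD i 0)))).items) :: agplLoopA gp rest (i + 1)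
    else
      ((d.insert "gaussian_prediction" none).items) :: agplLoopA gp rest i

def add_gaussian_prediction_labels (lines : List (List (String × String))) (gaussian_prediction : List Int) : List (List (String × Option String)) :=
  agplLoopA gaussian_prediction lines 0

-- ===== PORT B =====
-- first pass: point['gaussian_prediction'] = None
def agplNone (p : List (String × String)) : List (String × Option String) :=
  ((pvPointDict p).insert "gaussian_prediction" none).items

-- fill pass body: modified_lines[pos]['gaussian_prediction'] = str(gaussian_prediction[count])
def agplStep (gp : List Int) (acc : List (List (String × Option String))) (e : Int × Int) : List (List (String × Option String)) :=
  acc.set e.2.toNat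
    (((PySem.Dict.mk (acc.getD e.2.toNat [])).insert "gaussian_prediction"
        (some (PySem.Int.toStr (PySem.List.pyGetD gp e.1 0)))).items)

def add_gaussian_prediction_labels_alt (lines : List (List (String × String))) (gaussian_prediction : List Int) : List (List (String × Option String)) :=
  let ml := lines.map agplNone
  let positive_positions :=
    ((PySem.List.enumerate ml 0).filter
        (fun e => (PySem.Dict.mk e.2).get? "delta_type" == some (some "positive"))).map (·.1)
  (PySem.List.enumerate positive_positions 0).foldl (agplStep gaussian_prediction) ml

-- ===== PRECONDITION & SPEC =====
-- Pre_ excludes inputs on which A raises: a point without a 'delta_type' key (KeyError) or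
-- more 'positive' points than predictions (IndexError); A returns on everything else.
def Pre_add_gaussian_prediction_labels (lines : List (List (String × String))) (gaussian_prediction : List Int) : Prop :=
  (∀ p ∈ lines, (pvPointDict p).contains "delta_type" = true) ∧
  lines.countP (fun p => (pvPointDict p).get? "delta_type" == some (some "positive")) ≤ gaussian_prediction.length

instance (lines : List (List (String × String))) (gaussian_prediction : List Int) : Decidable (Pre_add_gaussian_prediction_labels lines gaussian_prediction) := by unfold Pre_add_gaussian_prediction_labels; infer_instance

def pvWitness_add_gaussian_prediction_labels : (List (List (String × String))) × List Int :=
  ([[("delta_type", "positive"), ("x", "1")], [("delta_type", "negative")]], [3])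

def Spec_add_gaussian_prediction_labels (lines : List (List (String × String))) (gaussian_prediction : List Int) (out : List (List (String × Option String))) : Prop := out = add_gaussian_prediction_labels_alt lines gaussian_prediction
instance (lines : List (List (String × String))) (gaussian_prediction : List Int) (out : List (List (String × Option String))) : Decidable (Spec_add_gaussian_prediction_labels lines gaussian_prediction out) := by unfold Spec_add_gaussian_prediction_labels; infer_instance

-- ===== CLAIM (what is proved, stated in full; the proofs are below) =====
def Claim_equal_add_gaussian_prediction_labels : Prop := ∀ (lines : List (List (String × String))) (gaussian_prediction : List Int), Dom_add_gaussian_prediction_labels lines gaussian_prediction → Pre_add_gaussian_prediction_labels lines gaussian_prediction → Spec_add_gaussian_prediction_labels lines gaussian_prediction (add_gaussian_prediction_labels lines gaussian_prediction)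

-- ===== LEMMAS AND PROOFS =====

theorem dict_insert_insert_same (d : PySem.Dict String (Option String)) (k : String)
    (v w : Option String) : (d.insert k v).insert k w = d.insert k w := by
  apply PySem.Dict.ext
  by_cases hc : d.contains k = true
  · rw [PySem.Dict.items_insert_of_contains _ w (PySem.Dict.contains_insert_self d k v),
      PySem.Dict.items_insert_of_contains _ v hc,
      PySem.Dict.items_insert_of_contains _ w hc, List.map_map]
    apply List.map_congr_left; intro p _
    by_cases hp : (p.1 == k) = true
    · simp only [Function.comp_apply, hp, if_pos, beq_self_eq_true]
    · simp only [Function.comp_apply, hp]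
      simp at hp
      simp [hp]
  · have hc' : d.contains k = false := by simpa using hc
    rw [PySem.Dict.items_insert_of_contains _ w (PySem.Dict.contains_insert_self d k v),
      PySem.Dict.items_insert_of_not_contains _ v hc',
      PySem.Dict.items_insert_of_not_contains _ w hc']
    rw [List.map_append]
    have hk : ∀ p ∈ d.items, (p.1 == k) = false := by
      intro p hp
      by_contra hbe
      have hpk : p.1 = k := by simpa using hbe
      have hmem : k ∈ d.keys := by
        have : p.1 ∈ d.items.map (·.1) := List.mem_map_of_mem hp
        rw [hpk] at this
        simpa [PySem.Dict.keys] using this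
      exact hc ((PySem.Dict.contains_iff_mem_keys d k).mpr hmem)
    have hmapid : List.map (fun p => if (p.1 == k) = true then (k, w) else p) d.items = d.items :=
      List.map_congr_left (fun p hp => by simp [hk p hp]) |>.trans (List.map_id _)
    rw [hmapid]; simp

theorem enumerate_shift {α : Type} (xs : List α) (s : Int) :
    PySem.List.enumerate xs s = (PySem.List.enumerate xs 0).map (fun e => (e.1 + s, e.2)) := by
  induction xs generalizing s with
  | nil => simp [PySem.List.enumerate_nil]
  | cons x xs ih =>
    rw [PySem.List.enumerate_cons, PySem.List.enumerate_cons, ih (s+1),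
      show (0:Int) + 1 = 1 from rfl, ih 1]
    simp only [List.map_cons, List.map_map]
    congr 1
    · simp
    · apply List.map_congr_left; intro e _; simp; omega

theorem fold_step_shift (gp : List Int) (ps : List Int) (h : ∀ j ∈ ps, 0 ≤ j) (c : Int)
    (x : List (String × Option String)) (l : List (List (String × Option String))) :
    (PySem.List.enumerate (ps.map (· + 1)) c).foldl (agplStep gp) (x :: l)
      = x :: (PySem.List.enumerate ps c).foldl (agplStep gp) l := by
  induction ps generalizing c l with
  | nil => simp [PySem.List.enumerate_nil]
  | cons j ps ih =>
    have hj : 0 ≤ j := h j (by simp)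
    simp only [List.map_cons, PySem.List.enumerate_cons, List.foldl_cons]
    have hstep : agplStep gp (x :: l) (c, j + 1) = x :: agplStep gp l (c, j) := by
      have ht : (j + 1).toNat = j.toNat + 1 := by omega
      simp [agplStep, ht]
    rw [hstep, ih (fun a ha => h a (by simp [ha]))]

theorem poss_nonneg {α : Type} (xs : List α) (g : Int × α → Bool) :
    ∀ j ∈ ((PySem.List.enumerate xs 0).filter g).map (·.1), 0 ≤ j := by
  intro j hj
  obtain ⟨e, he, rfl⟩ := List.mem_map.mp hj
  obtain ⟨k, hk, rfl⟩ := (PySem.List.mem_enumerate_iff xs 0 e).mp (List.mem_filter.mp he).1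
  simp


theorem agpl_main (gp : List Int) (lines : List (List (String × String))) (i : Nat) :
    (PySem.List.enumerate
        (((PySem.List.enumerate (lines.map agplNone) 0).filter
            (fun e => (PySem.Dict.mk e.2).get? "delta_type" == some (some "positive"))).map (·.1))
        (i : Int)).foldl (agplStep gp) (lines.map agplNone)
      = agplLoopA gp lines i := by
  induction lines generalizing i with
  | nil => simp [PySem.List.enumerate_nil, agplLoopA]
  | cons p rest ih =>
    have hne : ("delta_type" : String) ≠ "gaussian_prediction" := by decide
    have hmk : PySem.Dict.mk (agplNone p) = (pvPointDict p).insert "gaussian_prediction" none := rfl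
    have hhead : (PySem.Dict.mk (agplNone p)).get? "delta_type"
        = (pvPointDict p).get? "delta_type" := by
      rw [hmk, PySem.Dict.get?_insert_of_ne _ _ hne]
    -- decompose the position list
    set g : Int × List (String × Option String) → Bool :=
      fun e => (PySem.Dict.mk e.2).get? "delta_type" == some (some "positive") with hg
    have hposs : ((PySem.List.enumerate (agplNone p :: rest.map agplNone) 0).filter g).map (·.1)
        = (if (pvPointDict p).get? "delta_type" == some (some "positive")
            then (0 : Int) :: (((PySem.List.enumerate (rest.map agplNone) 0).filter g).map (·.1)).map (· + 1)
            else (((PySem.List.enumerate (rest.map agplNone) 0).filter g).map (·.1)).map (· + 1)) := by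
      rw [PySem.List.enumerate_cons, show (0:Int)+1 = 1 from rfl,
        enumerate_shift (rest.map agplNone) 1]
      rw [List.filter_cons]
      have hgm : ∀ (l : List (Int × List (String × Option String))),
          (l.map (fun e => (e.1 + 1, e.2))).filter g = (l.filter g).map (fun e => (e.1 + 1, e.2)) := by
        intro l
        rw [List.filter_map]
        rfl
      rw [hgm]
      by_cases hp : g (0, agplNone p) = true
      · have hcond : ((pvPointDict p).get? "delta_type" == some (some "positive")) = true := by
          simpa [hg, hhead] using hp
        simp only [hp, hcond, if_true, List.map_cons, List.map_map]
        rfl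
      · have hb : g (0, agplNone p) = false := by simpa using hp
        have hcond : ((pvPointDict p).get? "delta_type" == some (some "positive")) = false := by
          simpa [hg, hhead] using hp
        simp only [hb, hcond, Bool.false_eq_true, if_false, List.map_map]
        rfl
    rw [List.map_cons, hposs]
    by_cases hc : ((pvPointDict p).get? "delta_type" == some (some "positive")) = true
    · have hnn := poss_nonneg (rest.map agplNone) g
      rw [if_pos hc, PySem.List.enumerate_cons, List.foldl_cons]
      have hstep0 : agplStep gp (agplNone p :: rest.map agplNone) ((i : Int), 0)
          = ((pvPointDict p).insert "gaussian_prediction"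
              (some (PySem.Int.toStr (gp.getD i 0)))).items :: rest.map agplNone := by
        simp only [agplStep, Int.toNat_zero, List.getD_cons_zero, List.set_cons_zero,
          PySem.List.pyGetD_natCast]
        rw [hmk, dict_insert_insert_same]
      rw [hstep0, fold_step_shift gp _ hnn _ _ _,
        show ((i : Int) + 1) = (((i + 1 : Nat)) : Int) by push_cast; ring, ih (i + 1)]
      simp [agplLoopA, hc]
    · rw [if_neg hc, fold_step_shift gp _ (poss_nonneg (rest.map agplNone) g) _ _ _, ih i]
      have hc' : ((pvPointDict p).get? "delta_type" == some (some "positive")) = false := by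
        simpa using hc
      simp [agplLoopA, hc', agplNone]

-- ===== VERDICT (by name: the statement is the Claim_ definition above) =====
theorem add_gaussian_prediction_labels_spec : Claim_equal_add_gaussian_prediction_labels := by
  intro lines gp _ _
  unfold Spec_add_gaussian_prediction_labels add_gaussian_prediction_labels add_gaussian_prediction_labels_alt
  exact (agpl_main gp lines 0).symm
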